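-- pv_equiv track=rewrite | github.com/ryuki999/atcoder | ahc/ahc014/a3.py | check_cor_line
-- ===== SOURCE A (Python) =====
-- def contain_target_cor(cor1, cor2, target_cor):
--     if cor1[0] > cor2[0]:
--         step = -1
--     else:
--         step = 1
--     for i in range(cor1[0], cor2[0], step):
--         if (i, cor1[1]) == target_cor:
--             return True
--     if cor1[1] > cor2[1]:
--         step = -1
--     else:
--         step = 1
--     for i in range(cor1[1], cor2[1], step):
--         if (cor1[0], i) == target_cor:
--             return True
--
--     return False
--
-- def check_cor_line(qs, q):
--
--     for qi in q:
--         for qsi in qs: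
--             if contain_target_cor(qsi[0], qsi[1], qi):
--                 return False
--             if contain_target_cor(qsi[1], qsi[2], qi):
--                 return False
--             if contain_target_cor(qsi[2], qsi[3], qi):
--                 return False
--             if contain_target_cor(qsi[3], qsi[0], qi):
--                 return False
--     return True
--
-- qs = []
-- ===== SOURCE B (Python) =====
-- def _on_edge(cor1, cor2, t):
--     # half-open edge from cor1 toward cor2 (cor2 excluded), same inclusion as A's range scan
--     (x1, y1), (x2, y2) = cor1, cor2
--     tx, ty = t
--     if ty == y1 and (x1 <= tx < x2 or x2 < tx <= x1):
--         return True
--     return tx == x1 and (y1 <= ty < y2 or y2 < ty <= y1)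
--
-- def check_cor_line(qs, q):
--     return not any(
--         _on_edge(a, b, qi) or _on_edge(b, c, qi) or _on_edge(c, d, qi) or _on_edge(d, a, qi)
--         for qi in q for (a, b, c, d) in qs)
-- ===== Notes on version B (the rewrite author's own statement) =====
-- stated objective: faster
-- what changed: A tests each target point by enumerating every integer coordinate of each half-open rectangle edge; B replaces each per-edge range scan with an O(1) interval/coordinate membership test with the same half-open inclusion.
import Mathlib
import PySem

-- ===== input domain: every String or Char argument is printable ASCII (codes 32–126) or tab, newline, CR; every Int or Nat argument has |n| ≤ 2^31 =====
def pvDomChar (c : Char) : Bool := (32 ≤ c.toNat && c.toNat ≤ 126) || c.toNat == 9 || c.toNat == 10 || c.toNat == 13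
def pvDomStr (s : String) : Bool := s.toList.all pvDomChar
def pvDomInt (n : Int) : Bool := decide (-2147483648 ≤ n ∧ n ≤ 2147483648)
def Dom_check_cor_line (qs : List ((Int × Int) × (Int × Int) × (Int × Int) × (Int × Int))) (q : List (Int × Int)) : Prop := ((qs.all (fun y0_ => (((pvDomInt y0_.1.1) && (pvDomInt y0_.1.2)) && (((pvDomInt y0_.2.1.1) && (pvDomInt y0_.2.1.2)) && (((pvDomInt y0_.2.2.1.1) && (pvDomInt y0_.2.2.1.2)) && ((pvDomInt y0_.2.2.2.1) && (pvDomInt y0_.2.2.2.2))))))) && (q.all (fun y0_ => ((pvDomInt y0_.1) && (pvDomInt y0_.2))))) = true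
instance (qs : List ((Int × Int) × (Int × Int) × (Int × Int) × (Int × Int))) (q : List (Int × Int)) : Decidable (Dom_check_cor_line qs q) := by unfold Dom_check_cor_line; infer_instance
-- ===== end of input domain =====

-- B replaces A's per-coordinate range scans by O(1) interval-membership tests (objective: faster, asymptotic).
-- ===== PORT A =====
-- lazy 'for i in range(a, b, 1): if p(i): return True' (n = len(range); short-circuits like the Python loop)
def scan_up (n : Nat) (a : Int) (p : Int → Bool) : Bool :=
  match n with
  | 0 => false
  | n + 1 => p a || scan_up n (a + 1) p

-- lazy 'for i in range(a, b, -1): if p(i): return True'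
def scan_down (n : Nat) (a : Int) (p : Int → Bool) : Bool :=
  match n with
  | 0 => false
  | n + 1 => p a || scan_down n (a - 1) p

-- 'any p over range(a, b, step)' for step = ±1, scanning lazily as Python's for-loop does
def range_any (a b step : Int) (p : Int → Bool) : Bool :=
  if 0 < step then scan_up (b - a).toNat a p else scan_down (a - b).toNat a p

def contain_target_cor (cor1 cor2 target_cor : Int × Int) : Bool :=
  let step1 : Int := if cor1.1 > cor2.1 then -1 else 1
  if range_any cor1.1 cor2.1 step1 (fun i => (i, cor1.2) == target_cor) then
    true
  else
    let step2 : Int := if cor1.2 > cor2.2 then -1 else 1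
    if range_any cor1.2 cor2.2 step2 (fun i => (cor1.1, i) == target_cor) then
      true
    else
      false

def check_cor_line (qs : List ((Int × Int) × (Int × Int) × (Int × Int) × (Int × Int))) (q : List (Int × Int)) : Bool :=
  -- early 'return False' on a hit = negation of an 'any' over the nested loops
  !(q.any fun qi => qs.any fun qsi =>
      contain_target_cor qsi.1 qsi.2.1 qi ||
      contain_target_cor qsi.2.1 qsi.2.2.1 qi ||
      contain_target_cor qsi.2.2.1 qsi.2.2.2 qi ||
      contain_target_cor qsi.2.2.2 qsi.1 qi)

-- ===== PORT B =====
def on_edge (cor1 cor2 t : Int × Int) : Bool :=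
  if t.2 == cor1.2 && ((cor1.1 ≤ t.1 && t.1 < cor2.1) || (cor2.1 < t.1 && t.1 ≤ cor1.1)) then
    true
  else
    t.1 == cor1.1 && ((cor1.2 ≤ t.2 && t.2 < cor2.2) || (cor2.2 < t.2 && t.2 ≤ cor1.2))

def check_cor_line_alt (qs : List ((Int × Int) × (Int × Int) × (Int × Int) × (Int × Int))) (q : List (Int × Int)) : Bool :=
  !(q.any fun qi => qs.any fun abcd =>
      let (a, b, c, d) := abcd
      on_edge a b qi || on_edge b c qi || on_edge c d qi || on_edge d a qi)

-- ===== PRECONDITION & SPEC =====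
def Spec_check_cor_line (qs : List ((Int × Int) × (Int × Int) × (Int × Int) × (Int × Int))) (q : List (Int × Int)) (out : Bool) : Prop := out = check_cor_line_alt qs q
instance (qs : List ((Int × Int) × (Int × Int) × (Int × Int) × (Int × Int))) (q : List (Int × Int)) (out : Bool) : Decidable (Spec_check_cor_line qs q out) := by unfold Spec_check_cor_line; infer_instance

-- ===== CLAIM (what is proved, stated in full; the proofs are below) =====
def Claim_equal_check_cor_line : Prop := ∀ (qs : List ((Int × Int) × (Int × Int) × (Int × Int) × (Int × Int))) (q : List (Int × Int)), Dom_check_cor_line qs q → Spec_check_cor_line qs q (check_cor_line qs q)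

-- ===== LEMMAS AND PROOFS =====
lemma scan_up_eq (a b : Int) (p : Int → Bool) :
    scan_up (b - a).toNat a p = (PySem.List.pyRange a b 1).any p := by
  generalize hn : (b - a).toNat = n
  induction n generalizing a with
  | zero =>
    rw [PySem.List.pyRange_one_eq_nil (by omega)]
    simp [scan_up]
  | succ n ih =>
    have hab : a < b := by omega
    rw [PySem.List.pyRange_one_cons hab]
    simp only [scan_up, List.any_cons]
    rw [ih (a + 1) (by omega)]

lemma scan_down_eq (a b : Int) (p : Int → Bool) :
    scan_down (a - b).toNat a p = (PySem.List.pyRange a b (-1)).any p := by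
  generalize hn : (a - b).toNat = n
  induction n generalizing a with
  | zero =>
    rw [PySem.List.pyRange_neg_one_eq_nil (by omega)]
    simp [scan_down]
  | succ n ih =>
    have hab : b < a := by omega
    rw [PySem.List.pyRange_neg_one_cons hab]
    simp only [scan_down, List.any_cons]
    rw [ih (a - 1) (by omega)]

lemma range_any_eq (a b : Int) (p : Int → Bool) :
    range_any a b (if a > b then -1 else 1) p
      = (PySem.List.pyRange a b (if a > b then -1 else 1)).any p := by
  by_cases h : a > b <;> simp [range_any, h, scan_up_eq, scan_down_eq]

lemma scan_any_h (a b y : Int) (t : Int × Int) :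
    ((PySem.List.pyRange a b (if a > b then -1 else 1)).any (fun i => (i, y) == t)) =
      (t.2 == y && ((a ≤ t.1 && t.1 < b) || (b < t.1 && t.1 ≤ a))) := by
  apply Bool.eq_iff_iff.mpr
  by_cases h : a > b <;>
    simp [h, List.any_eq_true, PySem.List.mem_pyRange_one, PySem.List.mem_pyRange_neg_one,
      Prod.ext_iff] <;>
    omega

lemma scan_any_v (a b x : Int) (t : Int × Int) :
    ((PySem.List.pyRange a b (if a > b then -1 else 1)).any (fun i => (x, i) == t)) =
      (t.1 == x && ((a ≤ t.2 && t.2 < b) || (b < t.2 && t.2 ≤ a))) := by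
  apply Bool.eq_iff_iff.mpr
  by_cases h : a > b <;>
    simp [h, List.any_eq_true, PySem.List.mem_pyRange_one, PySem.List.mem_pyRange_neg_one,
      Prod.ext_iff] <;>
    omega

lemma contain_eq_on_edge (c1 c2 t : Int × Int) :
    contain_target_cor c1 c2 t = on_edge c1 c2 t := by
  simp only [contain_target_cor, on_edge]
  rw [range_any_eq, range_any_eq, scan_any_h, scan_any_v]
  split <;> apply Bool.eq_iff_iff.mpr <;> simp

-- ===== VERDICT (by name: the statement is the Claim_ definition above) =====
theorem check_cor_line_spec : Claim_equal_check_cor_line := by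
  intro qs q _
  unfold Spec_check_cor_line check_cor_line check_cor_line_alt
  simp only [contain_eq_on_edge]
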